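-- pv_equiv track=rewrite | github.com/LinjieMu/MedCEG | code/GraphReward.py | build_graph_structures
-- ===== SOURCE A (Python) =====
-- from typing import Any, List, Set, Tuple, Dict, Optional
-- from collections import defaultdict, deque
--
-- Triple = Tuple[Any, Any, Any]
--
-- Graph = List[Triple]
--
-- AdjacencyList = Dict[Any, List[Any]]
--
-- def build_graph_structures(graph: Graph) -> Tuple[AdjacencyList, Set[Any], Set[Tuple[Any, Any]], Set[Triple]]:
--     """Converts a list of triples into an adjacency list, node set, edge set, and a complete set of triples."""
--     adj = defaultdict(list)
--     nodes = set()
--     edges = set()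
--     triples = set()
--     for s, p, o in graph:
--         if s != o:
--             adj[s].append(o)
--         nodes.add(s)
--         nodes.add(o)
--         edges.add((s, o))
--         triples.add((s, p, o))
--     return adj, nodes, edges, triples
-- ===== SOURCE B (Python) =====
-- from collections import defaultdict
--
-- def build_graph_structures(graph):
--     """Group-by formulation: self-loop-free (s, o) pairs are extracted once, the
--     adjacency list is built per distinct subject by scanning those pairs, and the
--     three sets fall out of direct comprehensions over graph."""
--     pairs = [(s, o) for s, _, o in graph if s != o]
--     adj = defaultdict(list)
--     for s in dict.fromkeys(s for s, _ in pairs):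
--         adj[s] = [o for s2, o in pairs if s2 == s]
--     nodes = {x for s, _, o in graph for x in (s, o)}
--     edges = {(s, o) for s, _, o in graph}
--     triples = set(graph)
--     return adj, nodes, edges, triples
-- ===== Notes on version B (the rewrite author's own statement) =====
-- stated objective: alternative
-- what changed: Instead of one pass mutating four accumulators, B extracts the self-loop-free (s,o) pairs, builds the adjacency list by group-by: one pass over the distinct subjects with an inner scan collecting each subject's objects (no incremental dict mutation), and obtains nodes/edges/triples as direct set comprehensions / set(graph).
import Mathlib
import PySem

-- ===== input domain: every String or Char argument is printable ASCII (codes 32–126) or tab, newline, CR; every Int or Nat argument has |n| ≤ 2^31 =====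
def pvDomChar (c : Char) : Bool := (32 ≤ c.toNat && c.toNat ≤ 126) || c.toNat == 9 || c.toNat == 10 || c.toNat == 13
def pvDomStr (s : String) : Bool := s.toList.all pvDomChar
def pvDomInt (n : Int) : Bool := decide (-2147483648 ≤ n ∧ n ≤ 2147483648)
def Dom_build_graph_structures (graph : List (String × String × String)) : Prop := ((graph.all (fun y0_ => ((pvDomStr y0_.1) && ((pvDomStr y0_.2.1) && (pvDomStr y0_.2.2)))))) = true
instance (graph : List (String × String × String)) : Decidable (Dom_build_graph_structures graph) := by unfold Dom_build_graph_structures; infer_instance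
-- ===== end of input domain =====

-- B replaces A's single pass with four mutable accumulators by a group-by
-- formulation: the self-loop-free (s,o) pairs are extracted once, the adjacency
-- list is assembled per distinct subject by an inner scan over those pairs, and
-- nodes/edges/triples come from direct comprehensions (objective: alternative).

-- ===== PORT A =====
-- one pass, four accumulators (adj, nodes, edges, triples), exactly as A's loop body
def build_graph_structures (graph : List (String × String × String)) : (List (String × List String)) × List String × (List (String × String)) × (List (String × String × String)) :=
  let st := graph.foldl
    (fun (st : PySem.Dict String (List String) × PySem.Set String × PySem.Set (String × String) × PySem.Set (String × String × String)) t =>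
      let (s, p, o) := t
      let adj := if s ≠ o then st.1.modify s [] (· ++ [o]) else st.1
      let nodes := PySem.Set.add (PySem.Set.add st.2.1 s) o
      let edges := PySem.Set.add st.2.2.1 (s, o)
      let triples := PySem.Set.add st.2.2.2 (s, p, o)
      (adj, nodes, edges, triples))
    (PySem.Dict.empty, PySem.Set.empty, PySem.Set.empty, PySem.Set.empty)
  (st.1.items, st.2.1, st.2.2.1, st.2.2.2)

-- ===== PORT B =====
-- group-by: pairs list, then one insert per distinct subject with an inner scan
def build_graph_structures_alt (graph : List (String × String × String)) : (List (String × List String)) × List String × (List (String × String)) × (List (String × String × String)) :=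
  let pairs := (graph.filter (fun t => t.1 ≠ t.2.2)).map (fun t => (t.1, t.2.2))
  let adj := (PySem.List.dedup (pairs.map (·.1))).foldl
    (fun (d : PySem.Dict String (List String)) s =>
      d.insert s ((pairs.filter (fun p => p.1 == s)).map (·.2)))
    PySem.Dict.empty
  let nodes := PySem.Set.ofList (graph.flatMap (fun t => [t.1, t.2.2]))
  let edges := PySem.Set.ofList (graph.map (fun t => (t.1, t.2.2)))
  let triples := PySem.Set.ofList graph
  (adj.items, nodes, edges, triples)

-- ===== PRECONDITION & SPEC =====
def Spec_build_graph_structures (graph : List (String × String × String)) (out : (List (String × List String)) × List String × (List (String × String)) × (List (String × String × String))) : Prop := out = build_graph_structures_alt graph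
instance (graph : List (String × String × String)) (out : (List (String × List String)) × List String × (List (String × String)) × (List (String × String × String))) : Decidable (Spec_build_graph_structures graph out) := by unfold Spec_build_graph_structures; infer_instance

-- ===== CLAIM (what is proved, stated in full; the proofs are below) =====
def Claim_equal_build_graph_structures : Prop := ∀ (graph : List (String × String × String)), Dom_build_graph_structures graph → Spec_build_graph_structures graph (build_graph_structures graph)

-- ===== LEMMAS AND PROOFS =====

-- A's fused fold splits into four independent folds over the same list.
theorem pv_split (graph : List (String × String × String))
    (d : PySem.Dict String (List String)) (n : PySem.Set String)
    (e : PySem.Set (String × String)) (tr : PySem.Set (String × String × String)) :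
    graph.foldl
      (fun (st : PySem.Dict String (List String) × PySem.Set String × PySem.Set (String × String) × PySem.Set (String × String × String)) t =>
        let (s, p, o) := t
        (if s ≠ o then st.1.modify s [] (· ++ [o]) else st.1,
         PySem.Set.add (PySem.Set.add st.2.1 s) o,
         PySem.Set.add st.2.2.1 (s, o),
         PySem.Set.add st.2.2.2 (s, p, o)))
      (d, n, e, tr)
    = (graph.foldl (fun d t => if t.1 ≠ t.2.2 then d.modify t.1 [] (· ++ [t.2.2]) else d) d,
       graph.foldl (fun n t => PySem.Set.add (PySem.Set.add n t.1) t.2.2) n,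
       graph.foldl (fun e t => PySem.Set.add e (t.1, t.2.2)) e,
       graph.foldl (fun tr t => PySem.Set.add tr (t.1, t.2.1, t.2.2)) tr) := by
  induction graph generalizing d n e tr with
  | nil => rfl
  | cons h t ih => simp only [List.foldl_cons]; exact ih _ _ _ _

-- a conditional fold step is a fold over the filtered, projected pairs
theorem pv_adj_filter (graph : List (String × String × String))
    (d : PySem.Dict String (List String)) :
    graph.foldl (fun d t => if t.1 ≠ t.2.2 then d.modify t.1 [] (· ++ [t.2.2]) else d) d
    = ((graph.filter (fun t => t.1 ≠ t.2.2)).map (fun t => (t.1, t.2.2))).foldl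
        (fun d p => d.modify p.1 [] (· ++ [p.2])) d := by
  induction graph generalizing d with
  | nil => rfl
  | cons h t ih =>
    by_cases hp : h.1 = h.2.2 <;> simpa [List.filter_cons, hp] using ih _

theorem pv_nodes (graph : List (String × String × String)) (n : PySem.Set String) :
    graph.foldl (fun n t => PySem.Set.add (PySem.Set.add n t.1) t.2.2) n
    = PySem.Set.update n (graph.flatMap (fun t => [t.1, t.2.2])) := by
  induction graph generalizing n with
  | nil => rfl
  | cons h t ih => simp [List.foldl, ih, PySem.Set.update]

theorem pv_edges (graph : List (String × String × String)) :
    graph.foldl (fun e t => PySem.Set.add e (t.1, t.2.2)) PySem.Set.empty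
    = PySem.Set.ofList (graph.map (fun t => (t.1, t.2.2))) := by
  rw [PySem.Set.ofList_eq_foldl, List.foldl_map]; rfl

theorem pv_triples (graph : List (String × String × String)) :
    graph.foldl (fun tr t => PySem.Set.add tr (t.1, t.2.1, t.2.2)) PySem.Set.empty
    = PySem.Set.ofList graph := by
  rw [PySem.Set.ofList_eq_foldl]; rfl

-- A's adjacency dict in closed form: items = distinct contributing subjects,
-- each paired with all its non-self objects in triple order.
theorem pv_adj (graph : List (String × String × String)) :
    (graph.foldl (fun (d : PySem.Dict String (List String)) t =>
        if t.1 ≠ t.2.2 then d.modify t.1 [] (· ++ [t.2.2]) else d) PySem.Dict.empty).items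
    = ((PySem.List.dedup (((graph.filter (fun t => t.1 ≠ t.2.2)).map (fun t => (t.1, t.2.2))).map (·.1))).foldl
         (fun (d : PySem.Dict String (List String)) s =>
           d.insert s ((((graph.filter (fun t => t.1 ≠ t.2.2)).map (fun t => (t.1, t.2.2))).filter (fun p => p.1 == s)).map (·.2)))
         PySem.Dict.empty).items := by
  rw [pv_adj_filter]
  generalize ((graph.filter (fun t => t.1 ≠ t.2.2)).map (fun t => (t.1, t.2.2))) = pairs
  have hkeys : (pairs.foldl (fun (d : PySem.Dict String (List String)) p => d.modify p.1 [] (· ++ [p.2])) PySem.Dict.empty).keys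
      = PySem.List.dedup (pairs.map (·.1)) := by
    rw [PySem.Dict.keys_foldl_modify_key pairs (fun p => p.1) [] (fun _ p v => v ++ [p.2]),
        PySem.Dict.keys_empty, PySem.Set.update_nil_left, PySem.List.dedup_eq_ofList]
  have hndk : (PySem.List.dedup (pairs.map (·.1))).Nodup := by
    rw [PySem.List.dedup_eq_ofList]; exact PySem.Set.nodup_ofList _
  have hnd : (pairs.foldl (fun (d : PySem.Dict String (List String)) p => d.modify p.1 [] (· ++ [p.2])) PySem.Dict.empty).keys.Nodup := by
    rw [hkeys]; exact hndk
  rw [PySem.Dict.items_eq_map_keys _ hnd [], hkeys,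
      PySem.Dict.items_foldl_insert_fresh (PySem.List.dedup (pairs.map (·.1))) (fun s => s)
        (fun s => ((pairs.filter (fun p => p.1 == s)).map (·.2))) PySem.Dict.empty
        (fun a _ => PySem.Dict.contains_empty a)
        (by rw [List.map_id']; exact hndk)]
  simp only [PySem.Dict.empty, List.nil_append]
  refine List.map_congr_left ?_
  intro k _
  rw [PySem.Dict.getD_foldl_modify_append]
  rfl

theorem build_graph_structures_spec' (graph : List (String × String × String)) :
    build_graph_structures graph = build_graph_structures_alt graph := by
  unfold build_graph_structures build_graph_structures_alt
  rw [pv_split]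
  refine Prod.ext ?_ (Prod.ext ?_ (Prod.ext ?_ ?_))
  · exact pv_adj graph
  · simpa [PySem.Set.ofList_eq_foldl] using pv_nodes graph PySem.Set.empty
  · exact pv_edges graph
  · exact pv_triples graph

-- ===== VERDICT (by name: the statement is the Claim_ definition above) =====
theorem build_graph_structures_spec : Claim_equal_build_graph_structures := by
  intro graph _
  unfold Spec_build_graph_structures
  exact build_graph_structures_spec' graph
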